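-- pv_equiv track=rewrite | github.com/leedy903/PS | 프로그래머스/3/12938. 최고의 집합/최고의 집합.py | solution
-- ===== SOURCE A (Python) =====
-- def solution(n, s):
--     share = s // n
--     if share == 0:
--         answer = [-1]
--     else:
--         answer = [share for _ in range(n)]
--         remain = s % n
--         for i in range(1, remain + 1):
--             answer[-i] += 1
--
--     return answer
-- ===== SOURCE B (Python) =====
-- def solution(n, s):
--     if s // n == 0:
--         return [-1]
--     return [(s + i) // n for i in range(n)]
-- ===== Notes on version B (the rewrite author's own statement) =====
-- stated objective: alternative
-- what changed: Replaces A's replicate-then-mutate scheme (build n copies of s//n, then loop incrementing the last s%n slots in place) with an independent per-index closed form: element i is simply (s+i)//n, so no remainder, no segments and no mutation are ever computed.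
import Mathlib
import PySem

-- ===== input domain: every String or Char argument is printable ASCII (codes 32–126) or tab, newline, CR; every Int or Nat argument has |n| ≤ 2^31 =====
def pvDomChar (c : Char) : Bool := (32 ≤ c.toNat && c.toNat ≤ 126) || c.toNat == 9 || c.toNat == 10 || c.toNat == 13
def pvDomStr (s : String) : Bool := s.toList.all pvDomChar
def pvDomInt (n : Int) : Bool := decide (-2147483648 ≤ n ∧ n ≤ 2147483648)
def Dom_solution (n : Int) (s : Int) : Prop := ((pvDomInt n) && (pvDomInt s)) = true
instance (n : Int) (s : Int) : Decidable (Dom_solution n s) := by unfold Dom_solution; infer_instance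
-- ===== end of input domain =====

-- B computes each element independently by the closed form (s+i)//n instead of A's
-- replicate-then-mutate loop over the last s%n slots (objective: alternative).

-- ===== PORT A =====
def solution (n : Int) (s : Int) : List Int :=
  let share := PySem.Int.floordiv s n
  if share = 0 then [-1]
  else
    let answer := (PySem.List.pyRange 0 n 1).map (fun _ => share)
    let remain := PySem.Int.mod s n
    -- for i in range(1, remain+1): answer[-i] += 1
    (PySem.List.pyRange 1 (remain + 1) 1).foldl
      (fun acc i => PySem.List.pySetD acc (-i) (PySem.List.pyGetD acc (-i) 0 + 1)) answer

-- ===== PORT B =====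
def solution_alt (n : Int) (s : Int) : List Int :=
  if PySem.Int.floordiv s n = 0 then [-1]
  else (PySem.List.pyRange 0 n 1).map (fun i => PySem.Int.floordiv (s + i) n)

-- ===== PRECONDITION & SPEC =====
-- Pre_ excludes exactly n = 0, where Python A raises ZeroDivisionError.
def Pre_solution (n : Int) (s : Int) : Prop := n ≠ 0
instance (n : Int) (s : Int) : Decidable (Pre_solution n s) := by unfold Pre_solution; infer_instance
def pvWitness_solution : Int × Int := (3, 14)
def Spec_solution (n : Int) (s : Int) (out : List Int) : Prop := out = solution_alt n s
instance (n : Int) (s : Int) (out : List Int) : Decidable (Spec_solution n s out) := by unfold Spec_solution; infer_instance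

-- ===== CLAIM (what is proved, stated in full; the proofs are below) =====
def Claim_equal_solution : Prop := ∀ (n : Int) (s : Int), Dom_solution n s → Pre_solution n s → Spec_solution n s (solution n s)

-- ===== LEMMAS AND PROOFS =====

-- A's loop body, named for the lemmas
def pvStep (acc : List Int) (i : Int) : List Int :=
  PySem.List.pySetD acc (-i) (PySem.List.pyGetD acc (-i) 0 + 1)

lemma pvMapConst (n : Int) (c : Int) :
    (PySem.List.pyRange 0 n 1).map (fun _ => c) = List.replicate n.toNat c := by
  rw [PySem.List.pyRange_one]
  simp [List.map_map, List.eq_replicate_iff]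

lemma pvStep_mid (m k : Nat) (a : Int) :
    pvStep (List.replicate (m + 1) a ++ List.replicate k (a + 1)) ((k : Int) + 1) =
      List.replicate m a ++ List.replicate (k + 1) (a + 1) := by
  have hlen : (List.replicate (m + 1) a ++ List.replicate k (a + 1)).length = m + 1 + k := by
    simp
  unfold pvStep
  rw [PySem.List.pySetD, PySem.List.pySet?, PySem.List.pyGetD, PySem.List.pyGet?,
      PySem.List.pyIdx?, hlen]
  have h1 : ¬ ((0:Int) ≤ -((k:Int) + 1)) := by omega
  have h2 : -((m + 1 + k : Nat) : Int) ≤ -((k:Int) + 1) := by push_cast; omega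
  have h3 : m + 1 + k - (-(-((k:Int) + 1))).toNat = m := by
    simp only [neg_neg]
    omega
  simp only [if_neg h1, if_pos h2, h3]
  have hget : (List.replicate (m + 1) a ++ List.replicate k (a + 1))[m]? = some a := by
    simp [List.getElem?_append]
  simp only [Option.bind_some, Option.map_some, hget, Option.getD_some]
  rw [List.set_append]
  simp only [List.length_replicate]
  have hlt : m < m + 1 := Nat.lt_succ_self m
  rw [if_pos hlt]
  have hset : (List.replicate (m + 1) a).set m (a + 1)
      = List.replicate m a ++ [a + 1] := by
    rw [List.replicate_succ' (n := m), List.set_append]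
    simp
  rw [hset, List.replicate_succ]
  simp

lemma pvLoopInv (a : Int) (nn : Nat) :
    ∀ r : Nat, r ≤ nn →
      (PySem.List.pyRange 1 ((r : Int) + 1) 1).foldl pvStep (List.replicate nn a) =
        List.replicate (nn - r) a ++ List.replicate r (a + 1) := by
  intro r
  induction r with
  | zero =>
    intro _
    rw [PySem.List.pyRange_one_eq_nil (by norm_num)]
    simp
  | succ r ih =>
    intro hle
    have h1 : ((r + 1 : Nat) : Int) + 1 = ((r : Nat) : Int) + 1 + 1 := by push_cast; ring
    rw [h1, PySem.List.pyRange_one_succ_right (by omega), List.foldl_append,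
        ih (by omega)]
    have hm : nn - r = (nn - (r + 1)) + 1 := by omega
    rw [hm]
    exact pvStep_mid (nn - (r + 1)) r a

-- B's per-index closed form equals the two-level value, elementwise
lemma pvElem (n s : Int) (hn : 0 < n) (k : Nat) (hk : (k : Int) < n) :
    PySem.Int.floordiv (s + k) n =
      if (k : Int) < n - PySem.Int.mod s n then PySem.Int.floordiv s n
      else PySem.Int.floordiv s n + 1 := by
  have hqr := PySem.Int.floordiv_mul_add_mod s n
  have hr0 : 0 ≤ PySem.Int.mod s n := PySem.Int.mod_nonneg s hn
  have hrn : PySem.Int.mod s n < n := PySem.Int.mod_lt s hn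
  split_ifs with h
  · rw [PySem.Int.floordiv_eq_iff_of_pos hn]
    constructor <;> nlinarith
  · rw [PySem.Int.floordiv_eq_iff_of_pos hn]
    constructor <;> nlinarith

-- B's map equals A's segment pair for a positive divisor
lemma pvMapEq (n s : Int) (hn : 0 < n) :
    (PySem.List.pyRange 0 n 1).map (fun i => PySem.Int.floordiv (s + i) n) =
      List.replicate (n.toNat - (PySem.Int.mod s n).toNat) (PySem.Int.floordiv s n) ++
        List.replicate (PySem.Int.mod s n).toNat (PySem.Int.floordiv s n + 1) := by
  have hr0 : 0 ≤ PySem.Int.mod s n := PySem.Int.mod_nonneg s hn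
  have hrn : PySem.Int.mod s n < n := PySem.Int.mod_lt s hn
  rw [PySem.List.pyRange_one]
  apply List.ext_getElem
  · simp; omega
  · intro k h1 h2
    simp only [List.getElem_map, List.getElem_range, zero_add]
    have hk : (k : Int) < n := by
      simp at h1; omega
    rw [pvElem n s hn k hk]
    rw [List.getElem_append]
    simp only [List.length_replicate, List.getElem_replicate]
    split_ifs with ha hb hb
    · rfl
    · exact absurd (show k < n.toNat - (PySem.Int.mod s n).toNat by omega) hb
    · exact absurd (show (k:Int) < n - PySem.Int.mod s n by omega) ha
    · rfl

theorem solution_spec : Claim_equal_solution := by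
  intro n s _ hpre
  unfold Spec_solution solution solution_alt
  simp only []
  by_cases hsh : PySem.Int.floordiv s n = 0
  · rw [if_pos hsh, if_pos hsh]
  · rw [if_neg hsh, if_neg hsh, pvMapConst]
    rcases lt_or_gt_of_ne hpre with hneg | hpos
    · -- n < 0 : A's list is empty and the loop never runs; B's range is empty too
      have hr : n < PySem.Int.mod s n ∧ PySem.Int.mod s n ≤ 0 := by
        have h := PySem.Int.mod_neg_bounds s (b := n) hneg
        exact h
      rw [show n.toNat = 0 from by omega,
          PySem.List.pyRange_one_eq_nil (show PySem.Int.mod s n + 1 ≤ 1 from by omega),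
          PySem.List.pyRange_one_eq_nil (show n ≤ 0 from by omega)]
      simp
    · -- n > 0 : A's loop increments the last `remain` slots; B's formula matches slotwise
      have hr0 : 0 ≤ PySem.Int.mod s n := PySem.Int.mod_nonneg s hpos
      have hrn : PySem.Int.mod s n < n := PySem.Int.mod_lt s hpos
      have hcast : PySem.Int.mod s n = (((PySem.Int.mod s n).toNat : Nat) : Int) := by omega
      rw [pvMapEq n s hpos, hcast]
      exact pvLoopInv (PySem.Int.floordiv s n) n.toNat (PySem.Int.mod s n).toNat (by omega)
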